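-- pv_equiv track=rewrite | github.com/kid2407/advent-of-code-2025 | src/day03.py | get_largest_joltage_for_row
-- ===== SOURCE A (Python) =====
-- def get_largest_joltage_for_row(row) -> int:
--     largest_digit = 0
--     second_largest_digit = 0
--
--     for i in range(len(row) - 1):
--         current_digit = int(row[i])
--         next_digit = int(row[i + 1])
--
--         if current_digit > largest_digit:
--             largest_digit = current_digit
--             second_largest_digit = next_digit
--         else:
--             if next_digit > second_largest_digit:
--                 second_largest_digit = next_digit
--
--     return largest_digit * 10 + second_largest_digit
-- ===== SOURCE B (Python) =====
-- def get_largest_joltage_for_row(row) -> int: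
--     # Pick the largest digit that still has a digit after it, then the best
--     # digit anywhere after its first occurrence.
--     if len(row) < 2:
--         return 0
--     prefix = [int(x) for x in row[:-1]]
--     largest = max(prefix)
--     m = prefix.index(largest)
--     return largest * 10 + max(int(row[i]) for i in range(m + 1, len(row)))
-- ===== Notes on version B (the rewrite author's own statement) =====
-- stated objective: alternative
-- what changed: Replaces A's single fused running-max pass with a max-then-locate-then-suffix-max decomposition (max of row[:-1], first index m of that max, then largest*10 + max(row[m+1:])); Pre_ excludes rows of length >= 2 whose entries row[:-1] are all <= 0 and whose head is negative or whose tail is all negative -- impossible for the digit strings the function reads -- since there A's 0-initialised running maxima clamp the result, an artefact of A's implementation that B does not reproduce.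
-- outside the precondition, e.g. on get_largest_joltage_for_row([-1, -2]): A returns 0, B returns -12; on get_largest_joltage_for_row([0, -5]): A returns 0, B returns -5
import Mathlib
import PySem

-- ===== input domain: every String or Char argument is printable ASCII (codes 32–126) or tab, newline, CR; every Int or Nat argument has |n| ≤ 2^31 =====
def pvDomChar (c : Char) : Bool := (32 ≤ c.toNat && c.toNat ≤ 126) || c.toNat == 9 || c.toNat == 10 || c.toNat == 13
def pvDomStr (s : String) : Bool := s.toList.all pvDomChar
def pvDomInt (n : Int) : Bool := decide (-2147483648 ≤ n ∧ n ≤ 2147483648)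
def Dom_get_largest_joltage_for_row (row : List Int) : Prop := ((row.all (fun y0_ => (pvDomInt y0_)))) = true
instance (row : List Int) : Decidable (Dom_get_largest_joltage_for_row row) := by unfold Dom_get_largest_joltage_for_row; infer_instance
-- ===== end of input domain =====

-- B replaces A's fused running-max pass by a max-then-locate-then-suffix-max decomposition (alternative, same cost).

-- ===== PORT A =====
-- A's loop body, named; lookups are always in range, so the .getD 0 default never fires
def bodyA (row : List Int) (st : Int × Int) (i : Int) : Int × Int :=
  let current_digit := (PySem.List.pyGet? row i).getD 0
  let next_digit := (PySem.List.pyGet? row (i + 1)).getD 0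
  if current_digit > st.1 then (current_digit, next_digit)
  else if next_digit > st.2 then (st.1, next_digit) else st

def get_largest_joltage_for_row (row : List Int) : Int :=
  let res := (PySem.List.pyRange 0 ((row.length : Int) - 1) 1).foldl (bodyA row) (0, 0)
  res.1 * 10 + res.2

-- ===== PORT B =====
-- row[:-1] is List.dropLast (exact for every length); max(l) for nonempty l is (PySem.List.max? l id).getD 0
def get_largest_joltage_for_row_alt (row : List Int) : Int :=
  if row.length < 2 then 0
  else
    let pre := row.dropLast
    let largest := (PySem.List.max? pre (fun v => v)).getD 0
    let m := (PySem.List.index? pre largest).getD 0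
    largest * 10 + ((PySem.List.max? (row.drop (m + 1)) (fun v => v)).getD 0)

-- ===== PRECONDITION & SPEC =====
-- The function reads a row of the puzzle's digit grid (entries are int() of digit chars,
-- so never negative). Pre_ excludes only the rows — impossible for digit strings — of
-- length ≥ 2 whose entries row[:-1] are all ≤ 0 AND whose head is negative or whose tail
-- is all negative: there A still returns, but its 0-initialised running maxima clamp the
-- result at 0, an artefact of A's implementation that B's decomposition does not mimic.
def Pre_get_largest_joltage_for_row (row : List Int) : Prop :=
  row.length < 2 ∨ (∃ d ∈ row.dropLast, 0 < d) ∨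
    ((∀ d ∈ row.take 1, 0 ≤ d) ∧ (∃ d ∈ row.drop 1, 0 ≤ d))
instance (row : List Int) : Decidable (Pre_get_largest_joltage_for_row row) := by
  unfold Pre_get_largest_joltage_for_row; infer_instance
def pvWitness_get_largest_joltage_for_row : List Int := [3, 7, 2]

def Spec_get_largest_joltage_for_row (row : List Int) (out : Int) : Prop := out = get_largest_joltage_for_row_alt row
instance (row : List Int) (out : Int) : Decidable (Spec_get_largest_joltage_for_row row out) := by unfold Spec_get_largest_joltage_for_row; infer_instance

-- ===== CLAIM (what is proved, stated in full; the proofs are below) =====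
def Claim_equal_get_largest_joltage_for_row : Prop := ∀ (row : List Int), Dom_get_largest_joltage_for_row row → Pre_get_largest_joltage_for_row row → Spec_get_largest_joltage_for_row row (get_largest_joltage_for_row row)

-- ===== LEMMAS AND PROOFS =====

-- A's loop as structural recursion on the list itself
def stepA (st : Int × Int) (c n : Int) : Int × Int :=
  if c > st.1 then (c, n) else if n > st.2 then (st.1, n) else st

def loopA : Int × Int → List Int → Int × Int
  | st, x :: y :: t => loopA (stepA st x y) (y :: t)
  | st, _ => st

-- max of row[:-1] for row = x :: y :: t
def maxP (x y : Int) (t : List Int) : Int := ((y :: t).dropLast).foldl max x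

-- max of the suffix after the first occurrence of the prefix max
def sufMax (x y : Int) (t : List Int) : Int :=
  (PySem.List.max? ((x :: y :: t).drop
      (((PySem.List.index? ((x :: y :: t).dropLast) (maxP x y t)).getD 0) + 1))
    (fun v => v)).getD 0

lemma foldl_max_init (l : List Int) : ∀ a b : Int, l.foldl max (max a b) = max a (l.foldl max b) := by
  induction l with
  | nil => intro a b; simp
  | cons c l ih =>
    intro a b
    simp only [List.foldl_cons, max_assoc]
    exact ih a (max b c)

lemma le_foldl_max (l : List Int) : ∀ a : Int, a ≤ l.foldl max a := by
  induction l with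
  | nil => intro a; simp
  | cons b l ih =>
    intro a
    simp only [List.foldl_cons]
    exact le_trans (le_max_left a b) (ih (max a b))

lemma mem_le_foldl_max (l : List Int) : ∀ a b : Int, a ∈ l → a ≤ l.foldl max b := by
  induction l with
  | nil => intro a b h; cases h
  | cons c l ih =>
    intro a b h
    simp only [List.foldl_cons]
    rcases List.mem_cons.mp h with rfl | h
    · exact le_trans (le_max_right b a) (le_foldl_max l _)
    · exact ih a (max b c) h

lemma mem_le_maxP (x y : Int) (t : List Int) :
    ∀ d ∈ (x :: y :: t).dropLast, d ≤ maxP x y t := by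
  intro d hd
  rw [List.dropLast_cons₂] at hd
  rcases List.mem_cons.mp hd with rfl | hd
  · exact le_foldl_max _ d
  · exact mem_le_foldl_max _ d x hd

lemma maxP_cons (x y z : Int) (t : List Int) : maxP x y (z :: t) = max x (maxP y z t) := by
  simp only [maxP, List.dropLast_cons₂, List.foldl_cons]
  exact foldl_max_init _ x y

lemma maxP_mem (x y : Int) (t : List Int) : maxP x y t ∈ (x :: y :: t).dropLast := by
  rw [List.dropLast_cons₂]
  unfold maxP
  rcases PySem.List.foldl_max_mem ((y :: t).dropLast) x with h | h
  · rw [h]; exact List.mem_cons_self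
  · exact List.mem_cons_of_mem _ h

lemma sufMax_cons (x y z : Int) (t : List Int) (h : x < maxP y z t) :
    sufMax x y (z :: t) = sufMax y z t := by
  have hM : maxP x y (z :: t) = maxP y z t := by rw [maxP_cons]; omega
  have hmem : maxP y z t ∈ (y :: z :: t).dropLast := maxP_mem y z t
  obtain ⟨k, hk⟩ := Option.isSome_iff_exists.mp ((PySem.List.index?_isSome_iff _ _).mpr hmem)
  simp only [sufMax, hM, List.dropLast_cons₂]
  simp only [List.dropLast_cons₂] at hk
  rw [PySem.List.index?_cons_of_ne _ (by omega : x ≠ maxP y z t), hk]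
  simp

lemma sufMax_self (x y : Int) (t : List Int) (h : maxP x y t = x) :
    sufMax x y t = t.foldl max y := by
  simp only [sufMax, h, List.dropLast_cons₂]
  rw [PySem.List.index?_cons_self]
  simp [PySem.List.max?_id_cons]

lemma loopA_char (t : List Int) : ∀ x y L S : Int,
    loopA (L, S) (x :: y :: t) =
      if maxP x y t > L then (maxP x y t, sufMax x y t)
      else (L, max S (t.foldl max y)) := by
  induction t with
  | nil =>
    intro x y L S
    have hx : maxP x y [] = x := by simp [maxP]
    have hs : sufMax x y [] = y := by rw [sufMax_self x y [] hx]; rfl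
    simp only [loopA, stepA, hx, hs]
    by_cases h1 : x > L
    · simp [h1]
    · simp only [h1, List.foldl_nil]
      by_cases h2 : y > S <;> simp [h2] <;> omega
  | cons z t' ih =>
    intro x y L S
    have hunf : loopA (L, S) (x :: y :: z :: t') = loopA (stepA (L, S) x y) (y :: z :: t') := rfl
    have hM : maxP x y (z :: t') = max x (maxP y z t') := maxP_cons x y z t'
    by_cases h1 : x > L
    · rw [hunf]
      have hst : stepA (L, S) x y = (x, y) := by simp [stepA, h1]
      rw [hst, ih y z x y]
      by_cases h2 : maxP y z t' > x
      · have he : maxP x y (z :: t') = maxP y z t' := by omega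
        rw [if_pos h2, he, sufMax_cons x y z t' h2]
        rw [if_pos (by omega : maxP y z t' > L)]
      · have hMx : maxP x y (z :: t') = x := by omega
        rw [if_neg h2, hMx, if_pos h1, sufMax_self x y (z :: t') hMx]
        have hc : (z :: t').foldl max y = max y (t'.foldl max z) := by
          simp only [List.foldl_cons]
          exact foldl_max_init t' y z
        rw [hc]
    · rw [hunf]
      have hst : stepA (L, S) x y = (L, max S y) := by
        simp only [stepA, if_neg h1]
        by_cases h2 : y > S <;> simp [h2] <;> omega
      rw [hst, ih y z L (max S y)]
      by_cases h2 : maxP y z t' > L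
      · have he : maxP x y (z :: t') = maxP y z t' := by omega
        rw [if_pos h2, he, sufMax_cons x y z t' (by omega)]
        rw [if_pos (by omega : maxP y z t' > L)]
      · have hn : ¬ maxP x y (z :: t') > L := by omega
        rw [if_neg h2, if_neg hn]
        have hc : (z :: t').foldl max y = max y (t'.foldl max z) := by
          simp only [List.foldl_cons]
          exact foldl_max_init t' y z
        rw [hc, max_assoc]

-- A's pyRange fold computes loopA
lemma rangefold_eq_loopA (row : List Int) : ∀ st : Int × Int,
    (PySem.List.pyRange 0 ((row.length : Int) - 1) 1).foldl (bodyA row) st = loopA st row := by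
  induction row with
  | nil =>
    intro st
    rw [PySem.List.pyRange_one_eq_nil (by simp)]
    rfl
  | cons x rest ih =>
    intro st
    cases rest with
    | nil =>
      rw [PySem.List.pyRange_one_eq_nil (by simp)]
      rfl
    | cons y t =>
      have h1 : PySem.List.pyGet? (x :: y :: t) (0 + 1) = some y := by
        rw [show ((0 : Int) + 1) = (((0 : Nat)) : Int) + 1 by norm_num,
          PySem.List.pyGet?_cons_succ]
        norm_num [PySem.List.pyGet?_zero_cons]
      have hb0 : bodyA (x :: y :: t) st 0 = stepA st x y := by
        simp only [bodyA, stepA, PySem.List.pyGet?_zero_cons, h1, Option.getD_some]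
      have hshift : ∀ st' : Int × Int,
          (PySem.List.pyRange (0 + 1) (((x :: y :: t).length : Int) - 1) 1).foldl
              (bodyA (x :: y :: t)) st'
            = (PySem.List.pyRange 0 (((y :: t).length : Int) - 1) 1).foldl
              (bodyA (y :: t)) st' := by
        intro st'
        rw [PySem.List.pyRange_one (0 + 1), PySem.List.pyRange_one 0]
        have hlen2 : ((((x :: y :: t).length : Int) - 1) - (0 + 1)).toNat
            = ((((y :: t).length : Int) - 1) - 0).toNat := by
          simp only [List.length_cons]
          omega
        rw [hlen2, List.foldl_map, List.foldl_map]
        congr 1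
        funext st'' k
        have e1 : PySem.List.pyGet? (x :: y :: t) (0 + 1 + (k : Int))
            = PySem.List.pyGet? (y :: t) (0 + (k : Int)) := by
          rw [show (0 : Int) + 1 + (k : Int) = (k : Int) + 1 by ring,
            PySem.List.pyGet?_cons_succ, zero_add]
        have e2 : PySem.List.pyGet? (x :: y :: t) (0 + 1 + (k : Int) + 1)
            = PySem.List.pyGet? (y :: t) (0 + (k : Int) + 1) := by
          rw [show (0 : Int) + 1 + (k : Int) + 1 = (((k + 1 : Nat)) : Int) + 1 by push_cast; ring,
            PySem.List.pyGet?_cons_succ]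
          congr 1
          push_cast
          ring
        simp only [bodyA, e1, e2]
      rw [PySem.List.pyRange_one_cons (by simp only [List.length_cons]; push_cast; omega),
        List.foldl_cons, hb0, hshift, ih]
      rfl

-- ===== VERDICT (by name: the statement is the Claim_ definition above) =====
theorem get_largest_joltage_for_row_spec : Claim_equal_get_largest_joltage_for_row := by
  intro row _ hpre
  unfold Spec_get_largest_joltage_for_row get_largest_joltage_for_row get_largest_joltage_for_row_alt
  rw [rangefold_eq_loopA row (0, 0)]
  match row, hpre with
  | [], _ => rfl
  | [x], _ => rfl
  | x :: y :: t, hpre =>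
    rw [loopA_char t x y 0 0]
    have hlen : ¬ (x :: y :: t).length < 2 := by simp [List.length_cons]
    rw [if_neg hlen]
    have hmax : (PySem.List.max? ((x :: y :: t).dropLast) (fun v => v)).getD 0 = maxP x y t := by
      rw [List.dropLast_cons₂, PySem.List.max?_id_cons]
      rfl
    simp only [hmax]
    by_cases h : maxP x y t > 0
    · rw [if_pos h]
      rfl
    · rw [if_neg h]
      have hcl : (∀ d ∈ (x :: y :: t).take 1, 0 ≤ d) ∧ (∃ d ∈ (x :: y :: t).drop 1, 0 ≤ d) := by
        rcases hpre with hlt | ⟨d, hd, hdpos⟩ | h3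
        · exact absurd hlt hlen
        · exact absurd (lt_of_lt_of_le hdpos (mem_le_maxP x y t d hd)) (by omega)
        · exact h3
      have hx0 : 0 ≤ x := hcl.1 x (by simp)
      obtain ⟨d, hd, hd0⟩ := hcl.2
      have hxle : x ≤ maxP x y t := le_foldl_max _ x
      have hMx : maxP x y t = x := by omega
      have hdle : d ≤ t.foldl max y := by
        simp only [List.drop_one, List.tail_cons] at hd
        rcases List.mem_cons.mp hd with rfl | hd
        · exact le_foldl_max t d
        · exact mem_le_foldl_max t d y hd
      have hs : (PySem.List.max? ((x :: y :: t).drop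
            (((PySem.List.index? ((x :: y :: t).dropLast) (maxP x y t)).getD 0) + 1))
          (fun v => v)).getD 0 = t.foldl max y := sufMax_self x y t hMx
      rw [hs, hMx]
      omega
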